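-- pv_equiv track=rewrite | github.com/rraquel/KnowtheeJune2025 | backend/ingestion/embedding/pipeline.py | _generate_hogan_summary
-- ===== SOURCE A (Python) =====
-- def _generate_hogan_summary(content: str) -> str:
--     """Generate a summary for a Hogan assessment.
--
--     Args:
--         content: Raw content of the Hogan assessment
--
--     Returns:
--         Summary text
--     """
--     # Extract key sections and scores
--     sections = []
--     current_section = []
--
--     for line in content.split('\n'):
--         if line.strip().startswith('Scale') or line.strip().startswith('Trait'):
--             if current_section:
--                 sections.append('\n'.join(current_section))
--             current_section = [line]
--         else:
--             current_section.append(line)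
--
--     if current_section:
--         sections.append('\n'.join(current_section))
--
--     # Format summary
--     summary = "Hogan Assessment Summary\n"
--     summary += "=" * 50 + "\n\n"
--
--     for section in sections:
--         summary += section + "\n\n"
--
--     return summary
-- ===== SOURCE B (Python) =====
-- def _generate_hogan_summary(content: str) -> str:
--     """Generate a summary for a Hogan assessment.
--
--     Single pass: instead of grouping lines into sections and then joining,
--     emit the title and then each line directly, prefixed by a blank-line
--     separator when it starts a new section and a plain newline otherwise.
--     """
--     parts = ["Hogan Assessment Summary\n", "=" * 50, "\n\n"]
--     first = True
--     for line in content.split('\n'):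
--         if first:
--             first = False
--         else:
--             parts.append("\n\n" if line.strip().startswith(('Scale', 'Trait')) else "\n")
--         parts.append(line)
--     parts.append("\n\n")
--     return "".join(parts)
-- ===== Notes on version B (the rewrite author's own statement) =====
-- stated objective: simpler
-- what changed: Replaces the two-phase group-into-sections-then-join structure (sections list, current_section buffer, final flush, second formatting loop) with a single pass that emits each line directly behind a blank-line or plain-newline separator, collecting pieces in one list joined once.
import Mathlib
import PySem

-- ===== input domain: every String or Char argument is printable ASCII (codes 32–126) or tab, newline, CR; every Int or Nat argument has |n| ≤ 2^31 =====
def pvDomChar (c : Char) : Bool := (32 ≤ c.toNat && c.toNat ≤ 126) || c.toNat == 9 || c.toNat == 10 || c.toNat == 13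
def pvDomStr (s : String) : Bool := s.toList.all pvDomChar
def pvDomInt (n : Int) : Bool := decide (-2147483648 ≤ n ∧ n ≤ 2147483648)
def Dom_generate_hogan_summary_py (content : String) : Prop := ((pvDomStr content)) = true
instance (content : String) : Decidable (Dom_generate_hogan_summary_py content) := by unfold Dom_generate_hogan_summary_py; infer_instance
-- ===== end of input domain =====

-- B fuses A's group-into-sections-then-format phases into one pass emitting per-line separators; both are total and proved equal on all inputs.

-- shared helpers: content.split('\n') and the header-line test both Pythons perform
def pvLines (content : String) : List String := (PySem.Str.split? content "\n").getD []

def pvHdr (line : String) : Bool :=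
  PySem.Str.startswith (PySem.Str.strip line) "Scale" || PySem.Str.startswith (PySem.Str.strip line) "Trait"

def pvTitle : String := "Hogan Assessment Summary\n" ++ String.ofList (List.replicate 50 '=') ++ "\n\n"

-- ===== PORT A =====
-- one step of A's grouping loop over the state (sections, current_section)
def pvStepA (st : List String × List String) (line : String) : List String × List String :=
  if pvHdr line then
    if st.2.isEmpty then (st.1, [line]) else (st.1 ++ [PySem.Str.join "\n" st.2], [line])
  else (st.1, st.2 ++ [line])

-- A's flush after the loop: 'if current_section: sections.append(...)'
def pvFinish (st : List String × List String) : List String :=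
  if st.2.isEmpty then st.1 else st.1 ++ [PySem.Str.join "\n" st.2]

-- A's formatting loop body: summary += section + "\n\n"
def pvFmt (s : String) (sec : String) : String := s ++ sec ++ "\n\n"

def generate_hogan_summary_py (content : String) : String :=
  (pvFinish ((pvLines content).foldl pvStepA ([], []))).foldl pvFmt pvTitle

-- ===== PORT B =====
-- B's loop body: separator (unless first line) then the line; the Bool is the 'first' flag
def pvStepB (p : String × Bool) (line : String) : String × Bool :=
  (p.1 ++ (if p.2 then "" else (if pvHdr line then "\n\n" else "\n")) ++ line, false)

def generate_hogan_summary_py_alt (content : String) : String :=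
  ((pvLines content).foldl pvStepB (pvTitle, true)).1 ++ "\n\n"

-- ===== PRECONDITION & SPEC =====
def Spec_generate_hogan_summary_py (content : String) (out : String) : Prop := out = generate_hogan_summary_py_alt content
instance (content : String) (out : String) : Decidable (Spec_generate_hogan_summary_py content out) := by unfold Spec_generate_hogan_summary_py; infer_instance

-- ===== CLAIM (what is proved, stated in full; the proofs are below) =====
def Claim_equal_generate_hogan_summary_py : Prop := ∀ (content : String), Dom_generate_hogan_summary_py content → Spec_generate_hogan_summary_py content (generate_hogan_summary_py content)

-- ===== LEMMAS AND PROOFS =====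

-- B's loop body once the 'first' flag is off
def pvBody (a : String) (line : String) : String :=
  a ++ (if pvHdr line then "\n\n" else "\n") ++ line

-- content.split('\n') is never the empty list
lemma pv_go_ne_nil (sep : List Char) (fuel : Nat) :
    ∀ (l cur : List Char) (acc : List (List Char)),
    PySem.Chars.splitOn.go sep fuel l cur acc ≠ [] := by
  induction fuel with
  | zero =>
      intro l cur acc
      simp [PySem.Chars.splitOn.go]
  | succ n ih =>
      intro l cur acc
      cases l with
      | nil => simp [PySem.Chars.splitOn.go]
      | cons c rest =>
          rw [PySem.Chars.splitOn.go]
          split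
          · exact ih _ _ _
          · exact ih _ _ _

lemma pvLines_ne_nil (content : String) : pvLines content ≠ [] := by
  unfold pvLines PySem.Str.split? PySem.Chars.split?
  have hsep : ("\n" : String).toList = ['\n'] := rfl
  rw [hsep]
  simp only [List.isEmpty_cons, if_false, Bool.false_eq_true, Option.map_some,
    Option.getD_some, ne_eq, List.map_eq_nil_iff]
  exact pv_go_ne_nil _ _ _ _ _

-- '\n'.join over a snoc, at the character level
lemma pv_chars_join_concat (sep : List Char) :
    ∀ (ps : List (List Char)) (p : List Char), ps ≠ [] →
    PySem.Chars.join sep (ps ++ [p]) = PySem.Chars.join sep ps ++ sep ++ p := by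
  intro ps
  induction ps with
  | nil => intro p h; exact absurd rfl h
  | cons q qs ih =>
      intro p _
      cases qs with
      | nil =>
          simp [PySem.Chars.join_cons_cons, PySem.Chars.join_singleton]
      | cons q2 rest =>
          have h2 := ih p (by simp)
          simp only [List.cons_append, PySem.Chars.join_cons_cons] at h2 ⊢
          rw [h2]
          simp [List.append_assoc]

lemma pv_join_singleton (x : String) : PySem.Str.join "\n" [x] = x := by
  apply String.toList_injective
  rw [PySem.Str.toList_join]
  simp [PySem.Chars.join_singleton]

lemma pv_join_concat (xs : List String) (x : String) (h : xs ≠ []) :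
    PySem.Str.join "\n" (xs ++ [x]) = PySem.Str.join "\n" xs ++ "\n" ++ x := by
  apply String.toList_injective
  rw [String.toList_append, String.toList_append, PySem.Str.toList_join, PySem.Str.toList_join]
  rw [List.map_append]
  simp only [List.map_cons, List.map_nil]
  exact pv_chars_join_concat _ _ _ (by simpa using h)

-- once B's 'first' flag is off it stays off, and the fold is the plain string fold pvBody
lemma pvB_after_first (rest : List String) :
    ∀ (acc : String),
    rest.foldl pvStepB (acc, false) = (rest.foldl pvBody acc, false) := by
  induction rest with
  | nil => intro acc; rfl
  | cons l rest ih =>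
      intro acc
      simp only [List.foldl_cons]
      have hb : pvStepB (acc, false) l = (pvBody acc l, false) := by
        simp only [pvStepB, pvBody, Bool.false_eq_true, if_false]
      rw [hb, ih]

-- main invariant: A's remaining grouping + formatting equals B's plain fold,
-- given a nonempty current section already holding the text 'join cur'
lemma pv_main (rest : List String) :
    ∀ (secs cur : List String) (t : String), cur ≠ [] →
    (pvFinish (rest.foldl pvStepA (secs, cur))).foldl pvFmt t
    = rest.foldl pvBody (secs.foldl pvFmt t ++ PySem.Str.join "\n" cur) ++ "\n\n" := by
  induction rest with
  | nil =>
      intro secs cur t h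
      simp only [List.foldl_nil, pvFinish]
      rw [if_neg (by simp [h])]
      rw [List.foldl_append]
      simp only [List.foldl_cons, List.foldl_nil, pvFmt]
  | cons l rest ih =>
      intro secs cur t h
      simp only [List.foldl_cons]
      by_cases hl : pvHdr l = true
      · have hstep : pvStepA (secs, cur) l = (secs ++ [PySem.Str.join "\n" cur], [l]) := by
          simp only [pvStepA, hl, if_true]
          rw [if_neg (by simp [h])]
        rw [hstep, ih _ _ t (by simp)]
        rw [List.foldl_append]
        simp only [List.foldl_cons, List.foldl_nil, pv_join_singleton, pvFmt, pvBody, hl, if_true]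
      · have hstep : pvStepA (secs, cur) l = (secs, cur ++ [l]) := by
          simp only [pvStepA, hl, Bool.false_eq_true, if_false]
        rw [hstep, ih _ _ t (by simp)]
        rw [pv_join_concat _ _ h]
        have : pvBody (secs.foldl pvFmt t ++ PySem.Str.join "\n" cur) l
            = secs.foldl pvFmt t ++ (PySem.Str.join "\n" cur ++ "\n" ++ l) := by
          simp only [pvBody, hl, Bool.false_eq_true, if_false, String.append_assoc]
        rw [this, ← String.append_assoc, ← String.append_assoc]

-- the first iteration of A's loop yields current_section = [line] whatever the branch
lemma pvStepA_init (l : String) : pvStepA ([], []) l = ([], [l]) := by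
  by_cases h : pvHdr l = true <;> simp [pvStepA, h]

-- ===== VERDICT (by name: the statement is the Claim_ definition above) =====
theorem generate_hogan_summary_py_spec : Claim_equal_generate_hogan_summary_py := by
  intro content _
  unfold Spec_generate_hogan_summary_py generate_hogan_summary_py generate_hogan_summary_py_alt
  rcases hlines : pvLines content with _ | ⟨l0, rest⟩
  · exact absurd hlines (pvLines_ne_nil content)
  · simp only [List.foldl_cons, pvStepA_init]
    have hB : pvStepB (pvTitle, true) l0 = (pvTitle ++ "" ++ l0, false) := by
      simp only [pvStepB, if_true]
    rw [hB, pvB_after_first, String.append_empty]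
    have hm := pv_main rest [] [l0] pvTitle (by simp)
    simp only [List.foldl_nil, pv_join_singleton] at hm
    rw [hm]
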